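-- pv_equiv track=rewrite | github.com/PhDChe/Poker-1 | ignitionBot/ivan/rlcard/rlcard/agents/UCT-P.py | is_flush
-- ===== SOURCE A (Python) =====
-- def is_flush(hand):
--     _rank, flush_suit = hand[0]
--     for card in hand[1:]:
--         _rank, suit = card
--         if suit != flush_suit:
--             return False
--     else:
--         return True
-- ===== SOURCE B (Python) =====
-- def is_flush(hand):
--     _rank, _flush_suit = hand[0]
--     return len({suit for _rank, suit in hand}) == 1
-- ===== Notes on version B (the rewrite author's own statement) =====
-- stated objective: idiomatic
-- what changed: Replaces A's first-suit-then-compare-each scan with building the set of distinct suits in one comprehension and testing that its cardinality is 1.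
import Mathlib
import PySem

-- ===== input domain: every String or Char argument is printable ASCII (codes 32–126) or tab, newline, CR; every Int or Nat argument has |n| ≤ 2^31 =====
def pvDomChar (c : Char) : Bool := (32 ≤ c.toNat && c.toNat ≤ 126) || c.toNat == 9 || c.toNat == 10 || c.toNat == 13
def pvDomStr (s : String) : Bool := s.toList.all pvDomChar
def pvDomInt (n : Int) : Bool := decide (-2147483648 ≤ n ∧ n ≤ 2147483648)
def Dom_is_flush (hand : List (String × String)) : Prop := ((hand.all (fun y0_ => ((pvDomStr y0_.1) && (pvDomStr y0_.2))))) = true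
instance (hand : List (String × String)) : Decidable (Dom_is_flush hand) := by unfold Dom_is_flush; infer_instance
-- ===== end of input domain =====

-- B replaces A's compare-each-suit-to-the-first scan by a distinct-suit set whose cardinality is tested (idiomatic; same cost).

-- ===== PORT A =====
-- loop 'for card in hand[1:]' with early return False on a mismatching suit
def is_flush_loop (flush_suit : String) : List (String × String) → Bool
  | [] => true
  | (_, suit) :: rest => if suit ≠ flush_suit then false else is_flush_loop flush_suit rest

def is_flush (hand : List (String × String)) : Bool :=
  match hand with
  | [] => false  -- unreachable: hand[0] raises IndexError, excluded by Pre_is_flush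
  | (_r, flush_suit) :: rest => is_flush_loop flush_suit rest

-- ===== PORT B =====
def is_flush_alt (hand : List (String × String)) : Bool :=
  match hand with
  | [] => false  -- unreachable: hand[0] raises IndexError, excluded by Pre_is_flush
  | _ :: _ => (PySem.Set.ofList (hand.map Prod.snd)).length == 1

-- ===== PRECONDITION & SPEC =====
-- Pre_ excludes only the empty hand, on which A raises IndexError at hand[0].
def Pre_is_flush (hand : List (String × String)) : Prop := hand ≠ []
instance (hand : List (String × String)) : Decidable (Pre_is_flush hand) := by unfold Pre_is_flush; infer_instance
def pvWitness_is_flush : (List (String × String)) := [("A", "S"), ("K", "S")]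

def Spec_is_flush (hand : List (String × String)) (out : Bool) : Prop := out = is_flush_alt hand
instance (hand : List (String × String)) (out : Bool) : Decidable (Spec_is_flush hand out) := by unfold Spec_is_flush; infer_instance

-- ===== CLAIM (what is proved, stated in full; the proofs are below) =====
def Claim_equal_is_flush : Prop := ∀ (hand : List (String × String)), Dom_is_flush hand → Pre_is_flush hand → Spec_is_flush hand (is_flush hand)

-- ===== LEMMAS AND PROOFS =====

theorem len_le_foldl_add {α : Type} [BEq α] (l : List α) (acc : PySem.Set α) :
    acc.length ≤ (l.foldl PySem.Set.add acc).length := by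
  induction l generalizing acc with
  | nil => simp
  | cons x t ih =>
    refine le_trans ?_ (ih (PySem.Set.add acc x))
    simp only [PySem.Set.add]
    split <;> simp

theorem loop_eq_set (t : List (String × String)) (s : String) :
    is_flush_loop s t = (((t.map Prod.snd).foldl PySem.Set.add [s]).length == 1) := by
  induction t generalizing s with
  | nil => simp [is_flush_loop]
  | cons c t ih =>
    obtain ⟨r, x⟩ := c
    by_cases hx : x = s
    · subst hx
      have hstep : is_flush_loop x ((r, x) :: t) = is_flush_loop x t := by
        simp [is_flush_loop]
      rw [hstep, ih]
      simp
    · simp only [is_flush_loop, if_pos hx, List.map, List.foldl]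
      have hadd : PySem.Set.add [s] x = [s, x] := by
        simp [PySem.Set.add, PySem.Set.contains, hx]
      rw [hadd]
      have h2 := len_le_foldl_add (t.map Prod.snd) ([s, x] : PySem.Set String)
      simp only [List.length_cons, List.length_nil] at h2
      symm
      simp only [beq_eq_false_iff_ne, ne_eq]
      omega

-- ===== VERDICT (by name: the statement is the Claim_ definition above) =====
theorem is_flush_spec : Claim_equal_is_flush := by
  intro hand _ hpre
  unfold Spec_is_flush
  match hand with
  | [] => exact absurd rfl hpre
  | (r, s) :: t =>
    simp only [is_flush, is_flush_alt, List.map, loop_eq_set]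
    rfl
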